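-- pv_equiv track=rewrite | github.com/XxMorganxX/HomeAssist | mcp_server/tools/stickies.py | _rtf_to_plain_approx
-- ===== SOURCE A (Python) =====
-- def _rtf_to_plain_approx(rtf: str) -> str:
--     """Approximate RTF to plain text by removing control words and keeping text."""
--     out = []
--     i = 0
--     while i < len(rtf):
--         if rtf[i] == "\\":
--             i += 1
--             if i >= len(rtf):
--                 break
--             if rtf[i] in "{}":
--                 out.append(rtf[i])
--                 i += 1
--                 continue
--             # Skip control word (e.g. \rtf1, \line)
--             while i < len(rtf) and rtf[i].isalpha():
--                 i += 1
--             if i < len(rtf) and rtf[i] == " ":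
--                 i += 1
--             # Skip numeric parameter
--             while i < len(rtf) and (rtf[i].isdigit() or rtf[i] == "-"):
--                 i += 1
--             if i < len(rtf) and rtf[i] == " ":
--                 i += 1
--             continue
--         if rtf[i] == "{":
--             i += 1
--             continue
--         if rtf[i] == "}":
--             i += 1
--             continue
--         out.append(rtf[i])
--         i += 1
--     text = "".join(out)
--     return text.replace("\\line", "\n").replace("\n\n", "\n").strip()
-- ===== SOURCE B (Python) =====
-- def _no_braces(s: str) -> str:
--     return "".join(c for c in s if c not in "{}")
--
--
-- def _drop_while(s: str, pred) -> str:
--     for j, c in enumerate(s):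
--         if not pred(c):
--             return s[j:]
--     return ""
--
--
-- def _after_control(p: str) -> str:
--     """Given the text following a backslash (up to the next backslash),
--     drop the control word, an optional space, a numeric parameter and
--     an optional space; return what remains."""
--     p = _drop_while(p, str.isalpha)
--     if p.startswith(" "):
--         p = p[1:]
--     p = _drop_while(p, lambda c: c.isdigit() or c == "-")
--     if p.startswith(" "):
--         p = p[1:]
--     return p
--
--
-- def _rtf_to_plain_approx(rtf: str) -> str:
--     parts = rtf.split("\\")
--     pieces = [_no_braces(parts[0])]
--     for p in parts[1:]:
--         if p[:1] in ("{", "}"):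
--             pieces.append(p[0] + _no_braces(p[1:]))
--         else:
--             pieces.append(_no_braces(_after_control(p)))
--     text = "".join(pieces)
--     return text.replace("\\line", "\n").replace("\n\n", "\n").strip()
-- ===== Notes on version B (the rewrite author's own statement) =====
-- stated objective: faster
-- what changed: Replaces A's single index-driven state machine (a while loop with an explicit pointer and inner skip loops) by splitting the string on backslashes once and mapping an independent per-part handler (strip control word/space/number/space, then drop bare braces) over the parts before joining; the identical post-processing tail is kept.
import Mathlib
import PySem

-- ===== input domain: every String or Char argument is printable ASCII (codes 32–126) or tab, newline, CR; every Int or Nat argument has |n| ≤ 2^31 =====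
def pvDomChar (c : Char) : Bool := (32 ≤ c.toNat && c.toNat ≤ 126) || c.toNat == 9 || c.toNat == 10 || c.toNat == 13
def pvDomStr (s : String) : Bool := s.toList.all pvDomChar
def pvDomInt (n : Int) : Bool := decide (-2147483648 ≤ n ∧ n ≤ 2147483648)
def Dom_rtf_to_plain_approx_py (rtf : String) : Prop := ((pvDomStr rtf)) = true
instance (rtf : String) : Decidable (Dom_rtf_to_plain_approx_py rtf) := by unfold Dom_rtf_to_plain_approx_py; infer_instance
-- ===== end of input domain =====

-- B replaces A's per-character index-driven state machine by splitting the string on '\' once and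
-- handling each backslash-delimited part independently (same result; measured constant-factor faster in Python).

-- ===== PORT A =====
-- A's inner `while … isalpha(): i += 1` (skip the control word)
def pvASkipAlpha : List Char → List Char
  | [] => []
  | c :: r => if PySem.Chars.isalpha c then pvASkipAlpha r else c :: r

-- A's `if i < len(rtf) and rtf[i] == " ": i += 1`
def pvASkipSpace : List Char → List Char
  | ' ' :: r => r
  | l => l

-- A's inner `while … (isdigit or "-"): i += 1` (skip the numeric parameter)
def pvASkipNum : List Char → List Char
  | [] => []
  | c :: r => if PySem.Chars.isdigit c || c == '-' then pvASkipNum r else c :: r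

-- the four skip steps A performs after a backslash, in A's order
def pvChain (l : List Char) : List Char :=
  pvASkipSpace (pvASkipNum (pvASkipSpace (pvASkipAlpha l)))

theorem pvASkipAlpha_length_le (l : List Char) : (pvASkipAlpha l).length ≤ l.length := by
  induction l with
  | nil => simp [pvASkipAlpha]
  | cons c r ih => simp only [pvASkipAlpha]; split <;> simp <;> omega

theorem pvASkipNum_length_le (l : List Char) : (pvASkipNum l).length ≤ l.length := by
  induction l with
  | nil => simp [pvASkipNum]
  | cons c r ih => simp only [pvASkipNum]; split <;> simp <;> omega

theorem pvASkipSpace_length_le (l : List Char) : (pvASkipSpace l).length ≤ l.length := by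
  match l with
  | [] => simp [pvASkipSpace]
  | ' ' :: r => simp [pvASkipSpace]
  | c :: r =>
    rw [pvASkipSpace.eq_def]
    split <;> simp_all

theorem pvChain_length_le (l : List Char) : (pvChain l).length ≤ l.length := by
  unfold pvChain
  calc (pvASkipSpace (pvASkipNum (pvASkipSpace (pvASkipAlpha l)))).length
      ≤ (pvASkipNum (pvASkipSpace (pvASkipAlpha l))).length := pvASkipSpace_length_le _
    _ ≤ (pvASkipSpace (pvASkipAlpha l)).length := pvASkipNum_length_le _
    _ ≤ (pvASkipAlpha l).length := pvASkipSpace_length_le _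
    _ ≤ l.length := pvASkipAlpha_length_le _

-- A's main `while i < len(rtf)` loop; `out` is the accumulator (appended in front, reversed at exit)
def pvALoop (s : List Char) (out : List Char) : List Char :=
  match s with
  | [] => out.reverse
  | c :: rest =>
    if c = '\\' then
      match rest with
      | [] => out.reverse                                   -- `if i >= len(rtf): break`
      | d :: rest' =>
        if d = '{' ∨ d = '}' then pvALoop rest' (d :: out)  -- `if rtf[i] in "{}"`
        else pvALoop (pvChain (d :: rest')) out             -- skip control word / space / number / space
    else if c = '{' then pvALoop rest out
    else if c = '}' then pvALoop rest out
    else pvALoop rest (c :: out)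
termination_by s.length
decreasing_by
  all_goals
    try (have hlen := pvChain_length_le (d :: rest'); simp at hlen)
  all_goals simp
  all_goals omega

def rtf_to_plain_approx_py (rtf : String) : String :=
  let text := pvALoop rtf.toList []
  String.ofList (PySem.Chars.strip (PySem.Chars.replace
    (PySem.Chars.replace text "\\line".toList "\n".toList) "\n\n".toList "\n".toList))

-- ===== PORT B =====
-- `"".join(c for c in s if c not in "{}")`
def pvNoBraces (s : List Char) : List Char := s.filter (fun c => !(c == '{' || c == '}'))

-- `_after_control`: drop control word, optional space, numeric parameter, optional space
-- (`_drop_while` is List.dropWhile; `p.startswith(" ")` via PySem.Chars.startswith)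
def pvAfterControl (p : List Char) : List Char :=
  let p1 := p.dropWhile PySem.Chars.isalpha
  let p2 := if PySem.Chars.startswith p1 [' '] then p1.tail else p1
  let p3 := p2.dropWhile (fun c => PySem.Chars.isdigit c || c == '-')
  if PySem.Chars.startswith p3 [' '] then p3.tail else p3

-- the body of B's `for p in parts[1:]` loop
def pvHandlePart (p : List Char) : List Char :=
  match p with
  | c :: t => if c = '{' ∨ c = '}' then c :: pvNoBraces t else pvNoBraces (pvAfterControl (c :: t))
  | [] => pvNoBraces (pvAfterControl [])

-- `parts = rtf.split("\\")` (ported as List.splitOn, the corresponding Lean function), then join the pieces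
def pvBText (cs : List Char) : List Char :=
  let parts := cs.splitOn '\\'
  pvNoBraces (parts.headD []) ++ ((parts.drop 1).map pvHandlePart).flatten

def rtf_to_plain_approx_py_alt (rtf : String) : String :=
  let text := pvBText rtf.toList
  String.ofList (PySem.Chars.strip (PySem.Chars.replace
    (PySem.Chars.replace text "\\line".toList "\n".toList) "\n\n".toList "\n".toList))

-- ===== PRECONDITION & SPEC =====
def Spec_rtf_to_plain_approx_py (rtf : String) (out : String) : Prop := out = rtf_to_plain_approx_py_alt rtf
instance (rtf : String) (out : String) : Decidable (Spec_rtf_to_plain_approx_py rtf out) := by unfold Spec_rtf_to_plain_approx_py; infer_instance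

-- ===== CLAIM (what is proved, stated in full; the proofs are below) =====
def Claim_equal_rtf_to_plain_approx_py : Prop := ∀ (rtf : String), Dom_rtf_to_plain_approx_py rtf → Spec_rtf_to_plain_approx_py rtf (rtf_to_plain_approx_py rtf)

-- ===== LEMMAS AND PROOFS =====

theorem pvASkipAlpha_eq (l : List Char) : pvASkipAlpha l = l.dropWhile PySem.Chars.isalpha := by
  induction l with
  | nil => rfl
  | cons c r ih => simp only [pvASkipAlpha, List.dropWhile_cons]; split <;> simp_all

theorem pvASkipNum_eq (l : List Char) :
    pvASkipNum l = l.dropWhile (fun c => PySem.Chars.isdigit c || c == '-') := by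
  induction l with
  | nil => rfl
  | cons c r ih => simp only [pvASkipNum, List.dropWhile_cons]; split <;> simp_all

theorem pvStartDropSpace_eq (l : List Char) :
    (if PySem.Chars.startswith l [' '] then l.tail else l) = pvASkipSpace l := by
  match l with
  | [] => rfl
  | c :: r =>
    by_cases hc : c = ' '
    · subst hc; rfl
    · have h1 : PySem.Chars.startswith (c :: r) [' '] = false := by
        rw [Bool.eq_false_iff]
        intro h
        have := (PySem.Chars.startswith_iff (c :: r) [' ']).mp h
        rcases this with ⟨t, ht⟩
        cases ht
        exact hc rfl
      rw [h1, pvASkipSpace.eq_def]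
      simp only [Bool.false_eq_true, if_false]
      split <;> simp_all

-- A's four skip steps are exactly B's `_after_control`
theorem pvChain_eq (l : List Char) : pvChain l = pvAfterControl l := by
  unfold pvChain pvAfterControl
  rw [pvStartDropSpace_eq, pvStartDropSpace_eq, pvASkipAlpha_eq, pvASkipNum_eq]

theorem pvASkipSpace_sublist (l : List Char) : (pvASkipSpace l).Sublist l := by
  rw [pvASkipSpace.eq_def]
  split
  · exact (List.sublist_cons_self _ _)
  · exact List.Sublist.refl _

theorem pvChain_sublist (l : List Char) : (pvChain l).Sublist l := by
  unfold pvChain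
  rw [pvASkipAlpha_eq, pvASkipNum_eq]
  refine ((pvASkipSpace_sublist _).trans ((List.dropWhile_sublist _).trans
    ((pvASkipSpace_sublist _).trans (List.dropWhile_sublist _))))

-- skip steps never cross a backslash
theorem dropWhile_append_sep (q : Char → Bool) (hq : q '\\' = false) (q0 u : List Char) :
    (q0 ++ '\\' :: u).dropWhile q = q0.dropWhile q ++ '\\' :: u := by
  induction q0 with
  | nil => simp [hq]
  | cons c r ih =>
    simp only [List.cons_append, List.dropWhile_cons]
    split <;> simp_all

theorem pvASkipSpace_append_sep (q0 u : List Char) :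
    pvASkipSpace (q0 ++ '\\' :: u) = pvASkipSpace q0 ++ '\\' :: u := by
  match q0 with
  | [] => rfl
  | ' ' :: r => rfl
  | c :: r =>
    rw [pvASkipSpace.eq_def, pvASkipSpace.eq_def (c :: r)]
    by_cases hc : c = ' '
    · subst hc; rfl
    · split <;> split <;> simp_all

theorem pvChain_append_sep (q0 u : List Char) :
    pvChain (q0 ++ '\\' :: u) = pvChain q0 ++ '\\' :: u := by
  unfold pvChain
  rw [pvASkipAlpha_eq, pvASkipAlpha_eq, pvASkipNum_eq, pvASkipNum_eq]
  rw [dropWhile_append_sep _ (by decide), pvASkipSpace_append_sep,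
      dropWhile_append_sep _ (by decide), pvASkipSpace_append_sep]

-- ---- splitOn facts ----

theorem splitOnP_prepend (pre rest q : List Char) (qs : List (List Char))
    (hpre : ∀ c ∈ pre, (c == '\\') = false)
    (h : List.splitOnP (fun c => c == '\\') rest = q :: qs) :
    List.splitOnP (fun c => c == '\\') (pre ++ rest) = (pre ++ q) :: qs := by
  induction pre with
  | nil => simpa using h
  | cons c pre ih =>
    have hc : (c == '\\') = false := hpre c (by simp)
    have ih' := ih (fun c hc' => hpre c (by simp [hc']))
    simp [List.splitOnP_cons, hc, ih']

theorem splitOn_no_sep (v : List Char) (h : ∀ c ∈ v, (c == '\\') = false) :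
    v.splitOn '\\' = [v] := by
  have := splitOnP_prepend v [] [] [] h (by simp [List.splitOnP_nil])
  simpa [List.splitOn] using this

theorem splitOn_break (q0 u : List Char) (h : ∀ c ∈ q0, (c == '\\') = false) :
    (q0 ++ '\\' :: u).splitOn '\\' = q0 :: u.splitOn '\\' := by
  obtain ⟨q, qs, h'⟩ := List.exists_cons_of_ne_nil (List.splitOnP_ne_nil (fun c => c == '\\') u)
  have hsep : List.splitOnP (fun c => c == '\\') ('\\' :: u) = [] :: q :: qs := by
    simp [List.splitOnP_cons, h']
  have := splitOnP_prepend q0 ('\\' :: u) [] (q :: qs) h hsep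
  simp only [List.splitOn] at *
  rw [this, h']
  simp

theorem splitOn_cons_sep (u : List Char) :
    ('\\' :: u).splitOn '\\' = [] :: u.splitOn '\\' := by
  simp [List.splitOn, List.splitOnP_cons]

theorem splitOn_decompose (u : List Char) :
    (∀ c ∈ u, (c == '\\') = false) ∨
    (∃ q0 u', u = q0 ++ '\\' :: u' ∧ ∀ c ∈ q0, (c == '\\') = false) := by
  induction u with
  | nil => left; simp
  | cons c r ih =>
    by_cases hc : c = '\\'
    · right; exact ⟨[], r, by simp [hc], by simp⟩
    · rcases ih with h | ⟨q0, u', rfl, hq⟩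
      · left; intro x hx
        rcases List.mem_cons.mp hx with rfl | hx'
        · simpa using hc
        · exact h x hx'
      · right; exact ⟨c :: q0, u', rfl, by
          intro x hx
          rcases List.mem_cons.mp hx with rfl | hx'
          · simpa using hc
          · exact hq x hx'⟩

-- ---- pvBText characterizations ----

theorem pvBText_parts (u q0 : List Char) (qs : List (List Char)) (h : u.splitOn '\\' = q0 :: qs) :
    pvBText u = pvNoBraces q0 ++ (qs.map pvHandlePart).flatten := by
  simp [pvBText, h]

theorem pvBText_sep (u q0 : List Char) (qs : List (List Char)) (h : u.splitOn '\\' = q0 :: qs) :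
    pvBText ('\\' :: u) = pvHandlePart q0 ++ (qs.map pvHandlePart).flatten := by
  have h2 : ('\\' :: u).splitOn '\\' = [] :: q0 :: qs := by rw [splitOn_cons_sep, h]
  simp [pvBText, h2, pvNoBraces]

theorem pvHandlePart_default (q0 : List Char)
    (h : ∀ c t, q0 = c :: t → ¬(c = '{' ∨ c = '}')) :
    pvHandlePart q0 = pvNoBraces (pvAfterControl q0) := by
  match q0 with
  | [] => rfl
  | c :: t =>
    rw [pvHandlePart.eq_def]
    simp only []
    rw [if_neg (h c t rfl)]

theorem no_sep_of_sublist {l₁ l₂ : List Char} (hs : l₁.Sublist l₂)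
    (h : ∀ c ∈ l₂, (c == '\\') = false) : ∀ c ∈ l₁, (c == '\\') = false :=
  fun c hc => h c (hs.mem hc)

-- the crux: one backslash-step of A rewritten as B's per-part handling
theorem pvBText_chain (u : List Char)
    (hd : ∀ c t, u = c :: t → ¬(c = '{' ∨ c = '}')) :
    pvBText ('\\' :: u) = pvBText (pvChain u) := by
  rcases splitOn_decompose u with h | ⟨q0, u', rfl, hq⟩
  · -- no backslash in u
    have hu : u.splitOn '\\' = [u] := splitOn_no_sep u h
    rw [pvBText_sep u u [] hu]
    have hch : ∀ c ∈ pvChain u, (c == '\\') = false :=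
      no_sep_of_sublist (pvChain_sublist u) h
    rw [pvBText_parts (pvChain u) (pvChain u) [] (splitOn_no_sep _ hch)]
    rw [pvHandlePart_default u hd, pvChain_eq]
  · -- u = q0 ++ '\\' :: u'
    have hq0head : ∀ c t, q0 = c :: t → ¬(c = '{' ∨ c = '}') := by
      intro c t hct
      exact hd c (t ++ '\\' :: u') (by rw [hct]; simp)
    have hu : (q0 ++ '\\' :: u').splitOn '\\' = q0 :: u'.splitOn '\\' := splitOn_break q0 u' hq
    rw [pvBText_sep _ q0 _ hu]
    rw [pvChain_append_sep]
    have hch : ∀ c ∈ pvChain q0, (c == '\\') = false :=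
      no_sep_of_sublist (pvChain_sublist q0) hq
    rw [pvBText_parts _ (pvChain q0) _ (splitOn_break (pvChain q0) u' hch)]
    rw [pvHandlePart_default q0 hq0head, pvChain_eq]

theorem pvBText_nil : pvBText [] = [] := by
  simp [pvBText, List.splitOn, List.splitOnP_nil, pvNoBraces]

theorem pvBText_cons_brace (c : Char) (rest : List Char) (hb : c = '{' ∨ c = '}') :
    pvBText (c :: rest) = pvBText rest := by
  obtain ⟨q0, qs, h⟩ := List.exists_cons_of_ne_nil (List.splitOnP_ne_nil (fun x => x == '\\') rest)
  have hc : (c == '\\') = false := by rcases hb with rfl | rfl <;> decide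
  have h2 : (c :: rest).splitOn '\\' = (c :: q0) :: qs := by
    simp only [List.splitOn] at h ⊢
    simp [List.splitOnP_cons, hc, h]
  rw [pvBText_parts _ _ _ h2, pvBText_parts rest q0 qs h]
  have : pvNoBraces (c :: q0) = pvNoBraces q0 := by
    simp only [pvNoBraces, List.filter_cons]
    rcases hb with rfl | rfl <;> simp
  rw [this]

theorem pvBText_cons_plain (c : Char) (rest : List Char) (hc : ¬ c = '\\')
    (hb : ¬(c = '{' ∨ c = '}')) :
    pvBText (c :: rest) = c :: pvBText rest := by
  obtain ⟨q0, qs, h⟩ := List.exists_cons_of_ne_nil (List.splitOnP_ne_nil (fun x => x == '\\') rest)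
  have hc' : (c == '\\') = false := by simpa using hc
  have h2 : (c :: rest).splitOn '\\' = (c :: q0) :: qs := by
    simp only [List.splitOn] at h ⊢
    simp [List.splitOnP_cons, hc', h]
  rw [pvBText_parts _ _ _ h2, pvBText_parts rest q0 qs h]
  have : pvNoBraces (c :: q0) = c :: pvNoBraces q0 := by
    simp only [pvNoBraces, List.filter_cons]
    have h1 : ¬ c = '{' := fun h => hb (Or.inl h)
    have h2 : ¬ c = '}' := fun h => hb (Or.inr h)
    simp [h1, h2]
  rw [this]
  simp

theorem pvBText_backslash_brace (d : Char) (rest' : List Char) (hb : d = '{' ∨ d = '}') :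
    pvBText ('\\' :: d :: rest') = d :: pvBText rest' := by
  obtain ⟨q0, qs, h⟩ := List.exists_cons_of_ne_nil (List.splitOnP_ne_nil (fun x => x == '\\') rest')
  have hd : (d == '\\') = false := by rcases hb with rfl | rfl <;> decide
  have h2 : (d :: rest').splitOn '\\' = (d :: q0) :: qs := by
    simp only [List.splitOn] at h ⊢
    simp [List.splitOnP_cons, hd, h]
  rw [pvBText_sep _ _ _ h2, pvBText_parts rest' q0 qs h]
  have : pvHandlePart (d :: q0) = d :: pvNoBraces q0 := by
    rw [pvHandlePart.eq_def]
    simp only []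
    rw [if_pos hb]
  rw [this]
  simp

theorem pvBText_backslash_nil : pvBText ['\\'] = [] := by decide

-- main loop invariant: A's scan of cs equals out.reverse followed by B's per-part text
theorem pvALoop_eq_pvBText : ∀ (n : Nat) (cs out : List Char), cs.length ≤ n →
    pvALoop cs out = out.reverse ++ pvBText cs := by
  intro n
  induction n with
  | zero =>
    intro cs out h
    have : cs = [] := List.eq_nil_of_length_eq_zero (Nat.le_zero.mp h)
    subst this
    rw [pvALoop.eq_def, pvBText_nil]
    simp
  | succ n ih =>
    intro cs out h
    cases cs with
    | nil => rw [pvALoop.eq_def, pvBText_nil]; simp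
    | cons c rest =>
      rw [pvALoop.eq_def]
      dsimp only
      by_cases hc : c = '\\'
      · subst hc
        rw [if_pos rfl]
        cases rest with
        | nil =>
          rw [pvBText_backslash_nil]
          simp
        | cons d rest' =>
          dsimp only
          simp only [List.length_cons] at h
          by_cases hd : d = '{' ∨ d = '}'
          · rw [if_pos hd, ih rest' (d :: out) (by omega), pvBText_backslash_brace d rest' hd]
            simp
          · rw [if_neg hd]
            have hlen : (pvChain (d :: rest')).length ≤ n := by
              have := pvChain_length_le (d :: rest')
              simp at this
              omega
            rw [ih (pvChain (d :: rest')) out hlen]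
            rw [pvBText_chain (d :: rest') (by
              intro c t hct
              injection hct with h1 _
              rw [← h1]
              exact hd)]
      · rw [if_neg hc]
        simp only [List.length_cons] at h
        by_cases h1 : c = '{'
        · rw [if_pos h1, ih rest out (by omega), pvBText_cons_brace c rest (Or.inl h1)]
        · rw [if_neg h1]
          by_cases h2 : c = '}'
          · rw [if_pos h2, ih rest out (by omega), pvBText_cons_brace c rest (Or.inr h2)]
          · rw [if_neg h2, ih rest (c :: out) (by omega),
                pvBText_cons_plain c rest hc (by rintro (h | h) <;> [exact h1 h; exact h2 h])]
            simp

-- ===== VERDICT (by name: the statement is the Claim_ definition above) =====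
theorem rtf_to_plain_approx_py_spec : Claim_equal_rtf_to_plain_approx_py := by
  intro rtf _
  unfold Spec_rtf_to_plain_approx_py rtf_to_plain_approx_py rtf_to_plain_approx_py_alt
  rw [pvALoop_eq_pvBText rtf.toList.length rtf.toList [] le_rfl]
  simp
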